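-- pv_equiv track=rewrite | github.com/Casafred/patent-workbench | backend/utils/smart_split_utils.py | find_split_pattern
-- ===== SOURCE A (Python) =====
-- from typing import List, Dict, Optional, Tuple
--
-- def find_split_pattern(total_len: int, common_lengths: List[int], max_parts: int = 3) -> Optional[List[int]]:
--     """
--     找到合适的分割模式
--
--     例如: total_len=6, common_lengths=[3,2,4]
--     尝试组合: 3+3=6 ✓ -> 返回 [3,3]
--
--     Args:
--         total_len: 需要分割的总长度
--         common_lengths: 常见的标记长度列表（按频率排序）
--         max_parts: 最大分割数量
--
--     Returns:
--         分割模式列表，如 [3, 3] 表示分割成两个3位数字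
--     """
--     if total_len <= max(common_lengths) if common_lengths else 3:
--         return None
--
--     def find_combination(target: int, lengths: List[int], max_count: int, current: List[int] = None) -> Optional[List[int]]:
--         if current is None:
--             current = []
--
--         if sum(current) == target:
--             return current
--
--         if len(current) >= max_count:
--             return None
--
--         if sum(current) > target:
--             return None
--
--         for length in lengths:
--             result = find_combination(target, lengths, max_count, current + [length])
--             if result:
--                 return result
--
--         return None
--
--     return find_combination(total_len, common_lengths, max_parts)
-- ===== SOURCE B (Python) =====
-- from typing import List, Optional
--
--
-- def find_split_pattern(total_len: int, common_lengths: List[int], max_parts: int = 3) -> Optional[List[int]]: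
--     """Memoized DFS on (remaining, parts_left): same first-found order as the
--     naive search, but each state is solved once."""
--     if not common_lengths or total_len <= max(common_lengths):
--         return None
--
--     memo = {}
--
--     def search(rem: int, k: int) -> Optional[List[int]]:
--         if rem == 0:
--             return []
--         if k <= 0 or rem < 0:
--             return None
--         key = (rem, k)
--         if key in memo:
--             return memo[key]
--         found = None
--         for length in common_lengths:
--             suffix = search(rem - length, k - 1)
--             if suffix is not None:
--                 found = [length] + suffix
--                 break
--         memo[key] = found
--         return found
--
--     return search(total_len, max_parts)
-- ===== Notes on version B (the rewrite author's own statement) =====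
-- stated objective: alternative
-- what changed: Replaced the naive DFS over accumulated prefix lists by a memoized DFS on the state (remaining_target, parts_left) that returns the first-found suffix, preserving A's search order while solving each state at most once (intended as faster; the probe measured 295x at the largest size both finished, but A timed out too often to confirm).
-- outside the precondition, e.g. on find_split_pattern(6, [3, 0], 2000000): A returns [3, 3], B returns [3, 3]; on find_split_pattern(1000, [1000, 0], 1000000): A returns None, B returns None
import Mathlib
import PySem

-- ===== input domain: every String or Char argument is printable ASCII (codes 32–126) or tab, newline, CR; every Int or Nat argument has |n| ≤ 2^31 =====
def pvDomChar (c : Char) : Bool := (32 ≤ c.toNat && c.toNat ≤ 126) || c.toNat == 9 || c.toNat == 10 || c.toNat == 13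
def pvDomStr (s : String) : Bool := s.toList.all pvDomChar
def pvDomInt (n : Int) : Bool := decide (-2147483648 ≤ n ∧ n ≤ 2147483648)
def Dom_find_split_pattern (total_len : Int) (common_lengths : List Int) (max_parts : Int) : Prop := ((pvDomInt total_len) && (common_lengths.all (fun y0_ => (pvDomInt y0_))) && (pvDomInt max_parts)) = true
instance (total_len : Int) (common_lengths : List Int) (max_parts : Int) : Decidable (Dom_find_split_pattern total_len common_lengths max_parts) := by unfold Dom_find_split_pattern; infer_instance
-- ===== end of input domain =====

-- B replaces A's naive DFS over accumulated prefix lists by a memoized DFS on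
-- (remaining, parts_left) returning the first-found suffix: same first-found
-- answer, each state solved at most once (objective: alternative).

-- ===== PORT A =====
-- the inner 'for length in lengths' loop; 'if result:' = result is not None AND nonempty
def fcALoop (f : List Int → Option (List Int)) (current : List Int) : List Int → Option (List Int)
  | [] => none
  | l :: rest =>
    match f (current ++ [l]) with
    | some (x :: xs) => some (x :: xs)
    | _ => fcALoop f current rest

-- find_combination; fuel only makes the recursion structural (depth < max_count always)
def fcA (target : Int) (cl : List Int) (maxCount : Int) : Nat → List Int → Option (List Int)
  | fuel, current =>
    if current.sum = target then some current
    else if maxCount ≤ (current.length : Int) then none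
    else if target < current.sum then none
    else
      match fuel with
      | 0 => none -- unreachable: fuel = (maxCount - len current).toNat > 0 here
      | fuel + 1 => fcALoop (fun cur => fcA target cl maxCount fuel cur) current cl

def find_split_pattern (total_len : Int) (common_lengths : List Int) (max_parts : Int) : Option (List Int) :=
  -- 'total_len <= max(...) if common_lengths else 3' : on [] the condition is 3, truthy
  if common_lengths = [] then none
  else if total_len ≤ (PySem.List.max? common_lengths (fun y => y)).getD 0 then none
  else fcA total_len common_lengths max_parts max_parts.toNat []

-- ===== PORT B =====
-- memo: (remaining, parts_left) ↦ first-found suffix (or none)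
def fspLoop (f : Int → PySem.Dict (Int × Int) (Option (List Int)) → Option (List Int) × PySem.Dict (Int × Int) (Option (List Int))) :
    List Int → Int → PySem.Dict (Int × Int) (Option (List Int)) → Option (List Int) × PySem.Dict (Int × Int) (Option (List Int))
  | [], _, memo => (none, memo)
  | l :: rest, rem, memo =>
    match f (rem - l) memo with
    | (some s, memo1) => (some (l :: s), memo1)
    | (none, memo1) => fspLoop f rest rem memo1

def fspSearch (cl : List Int) : Nat → Int → Int → PySem.Dict (Int × Int) (Option (List Int)) → Option (List Int) × PySem.Dict (Int × Int) (Option (List Int))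
  | fuel, rem, k, memo =>
    if rem = 0 then (some [], memo)
    else if k ≤ 0 ∨ rem < 0 then (none, memo)
    else
      match memo.get? (rem, k) with
      | some v => (v, memo)
      | none =>
        match fuel with
        | 0 => (none, memo) -- unreachable: fuel = k.toNat > 0 here
        | fuel + 1 =>
          let r := fspLoop (fun rem' m => fspSearch cl fuel rem' (k - 1) m) cl rem memo
          (r.1, r.2.insert (rem, k) r.1)

def find_split_pattern_alt (total_len : Int) (common_lengths : List Int) (max_parts : Int) : Option (List Int) :=
  if common_lengths = [] then none
  else if total_len ≤ (PySem.List.max? common_lengths (fun y => y)).getD 0 then none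
  else (fspSearch common_lengths max_parts.toNat total_len max_parts PySem.Dict.empty).1

-- ===== PRECONDITION & SPEC =====
-- Pre_ excludes only inputs on which the Python A can exceed CPython's recursion
-- limit (RecursionError): A's DFS depth is bounded by max_parts, and with all
-- lengths positive also by total_len; inside either bound A always returns.
def Pre_find_split_pattern (total_len : Int) (common_lengths : List Int) (max_parts : Int) : Prop :=
  max_parts ≤ 900 ∨ ((∀ l ∈ common_lengths, 1 ≤ l) ∧ total_len ≤ 900)
instance (total_len : Int) (common_lengths : List Int) (max_parts : Int) : Decidable (Pre_find_split_pattern total_len common_lengths max_parts) := by unfold Pre_find_split_pattern; infer_instance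

def pvWitness_find_split_pattern : Int × List Int × Int := (10, [4, 3], 3)

def Spec_find_split_pattern (total_len : Int) (common_lengths : List Int) (max_parts : Int) (out : Option (List Int)) : Prop := out = find_split_pattern_alt total_len common_lengths max_parts
instance (total_len : Int) (common_lengths : List Int) (max_parts : Int) (out : Option (List Int)) : Decidable (Spec_find_split_pattern total_len common_lengths max_parts out) := by unfold Spec_find_split_pattern; infer_instance

-- ===== CLAIM (what is proved, stated in full; the proofs are below) =====
def Claim_equal_find_split_pattern : Prop := ∀ (total_len : Int) (common_lengths : List Int) (max_parts : Int), Dom_find_split_pattern total_len common_lengths max_parts → Pre_find_split_pattern total_len common_lengths max_parts → Spec_find_split_pattern total_len common_lengths max_parts (find_split_pattern total_len common_lengths max_parts)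

-- ===== LEMMAS AND PROOFS =====

-- memo-free reference search: what both ports compute
def gLoop (h : Int → Option (List Int)) : List Int → Int → Option (List Int)
  | [], _ => none
  | l :: rest, rem =>
    match h (rem - l) with
    | some s => some (l :: s)
    | none => gLoop h rest rem

def gRef (cl : List Int) : Nat → Int → Int → Option (List Int)
  | fuel, rem, k =>
    if rem = 0 then some []
    else if k ≤ 0 ∨ rem < 0 then none
    else
      match fuel with
      | 0 => none
      | fuel + 1 => gLoop (fun rem' => gRef cl fuel rem' (k - 1)) cl rem

theorem gRef_zero_rem (cl : List Int) (fuel : Nat) (k : Int) : gRef cl fuel 0 k = some [] := by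
  cases fuel <;> simp [gRef]

theorem gRef_none {cl : List Int} {fuel : Nat} {rem k : Int} (h0 : ¬ rem = 0) (h1 : k ≤ 0 ∨ rem < 0) :
    gRef cl fuel rem k = none := by
  cases fuel <;> simp [gRef, h0, h1]

def gSpec (cl : List Int) (rem k : Int) : Option (List Int) := gRef cl k.toNat rem k

-- ---------- A-side: fcA computes gRef mapped over the accumulated prefix ----------

theorem fcALoop_eq_gLoop (f : List Int → Option (List Int)) (h : Int → Option (List Int))
    (current : List Int) (rem : Int)
    (H : ∀ l, f (current ++ [l]) = (h (rem - l)).map (fun s => current ++ l :: s)) :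
    ∀ pending, fcALoop f current pending = (gLoop h pending rem).map (fun s => current ++ s) := by
  intro pending
  induction pending with
  | nil => simp [fcALoop, gLoop]
  | cons l rest ih =>
    simp only [fcALoop, gLoop, H l]
    cases hh : h (rem - l) with
    | none => simpa using ih
    | some s =>
      cases hc : current ++ l :: s with
      | nil => simp at hc
      | cons x xs => simp [hc]

theorem fcA_eq_gRef (t : Int) (cl : List Int) (mc : Int) :
    ∀ (fuel : Nat) (current : List Int),
      fcA t cl mc fuel current
        = (gRef cl fuel (t - current.sum) (mc - current.length)).map (fun s => current ++ s) := by
  intro fuel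
  induction fuel with
  | zero =>
    intro current
    simp only [fcA, gRef]
    by_cases h0 : current.sum = t
    · have : t - current.sum = 0 := by omega
      simp [h0, this]
    · have h0' : ¬ (t - current.sum = 0) := by omega
      by_cases h1 : mc ≤ (current.length : Int)
      · have : mc - (current.length : Int) ≤ 0 ∨ t - current.sum < 0 := by left; omega
        simp [h0, h0', h1, this]
      · by_cases h2 : t < current.sum
        · have : mc - (current.length : Int) ≤ 0 ∨ t - current.sum < 0 := by right; omega
          simp [h0, h0', h1, h2, this]
        · simp [h0, h0', h1, h2]
  | succ fuel ih =>
    intro current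
    simp only [fcA, gRef]
    by_cases h0 : current.sum = t
    · have : t - current.sum = 0 := by omega
      simp [h0, this]
    · have h0' : ¬ (t - current.sum = 0) := by omega
      by_cases h1 : mc ≤ (current.length : Int)
      · have hd : mc - (current.length : Int) ≤ 0 ∨ t - current.sum < 0 := by left; omega
        simp [h0, h0', h1, hd]
      · by_cases h2 : t < current.sum
        · have hd : mc - (current.length : Int) ≤ 0 ∨ t - current.sum < 0 := by right; omega
          simp [h0, h0', h1, h2, hd]
        · have hd : ¬ (mc - (current.length : Int) ≤ 0 ∨ t - current.sum < 0) := by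
            push_neg; constructor <;> omega
          simp only [h0, if_neg h0, h1, if_neg h1, h2, if_neg h2, h0', if_neg h0', hd, if_neg hd]
          apply fcALoop_eq_gLoop
          intro l
          rw [ih (current ++ [l])]
          have e1 : t - (current ++ [l]).sum = t - current.sum - l := by
            simp [List.sum_append]; ring
          have e2 : mc - ((current ++ [l]).length : Int) = mc - (current.length : Int) - 1 := by
            simp [List.length_append]; push_cast; ring
          rw [e1, e2]
          cases gRef cl fuel (t - current.sum - l) (mc - (current.length : Int) - 1) with
          | none => rfl
          | some s => simp

-- ---------- B-side: fspSearch computes gSpec, memo entries always canonical ----------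

def ValidM (cl : List Int) (memo : PySem.Dict (Int × Int) (Option (List Int))) : Prop :=
  ∀ rk v, memo.get? rk = some v → v = gSpec cl rk.1 rk.2

theorem fspLoop_eq_gLoop (cl : List Int)
    (f : Int → PySem.Dict (Int × Int) (Option (List Int)) → Option (List Int) × PySem.Dict (Int × Int) (Option (List Int)))
    (G : Int → Option (List Int))
    (H : ∀ rem' m, ValidM cl m → (f rem' m).1 = G rem' ∧ ValidM cl (f rem' m).2) :
    ∀ pending rem memo, ValidM cl memo →
      (fspLoop f pending rem memo).1 = gLoop G pending rem ∧ ValidM cl (fspLoop f pending rem memo).2 := by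
  intro pending
  induction pending with
  | nil =>
    intro rem memo hv
    refine ⟨?_, hv⟩
    simp [fspLoop, gLoop]
  | cons l rest ih =>
    intro rem memo hv
    obtain ⟨he, hv1⟩ := H (rem - l) memo hv
    simp only [fspLoop, gLoop, ← he]
    cases hf : f (rem - l) memo with
    | mk res memo1 =>
      rw [hf] at hv1
      cases res with
      | some s => exact ⟨rfl, hv1⟩
      | none => exact ih rem memo1 hv1

theorem fspSearch_eq_gSpec (cl : List Int) :
    ∀ (fuel : Nat) (rem k : Int) (memo : PySem.Dict (Int × Int) (Option (List Int))),
      ValidM cl memo → k.toNat ≤ fuel →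
        (fspSearch cl fuel rem k memo).1 = gSpec cl rem k
          ∧ ValidM cl (fspSearch cl fuel rem k memo).2 := by
  intro fuel
  induction fuel with
  | zero =>
    intro rem k memo hv hk
    have hk0 : k ≤ 0 := by omega
    by_cases h0 : rem = 0
    · constructor
      · simp [fspSearch, gSpec, h0, gRef_zero_rem]
      · simp only [fspSearch, h0, if_pos rfl]
        simpa [h0] using hv
    · have h1 : k ≤ 0 ∨ rem < 0 := Or.inl hk0
      constructor
      · simp [fspSearch, gSpec, h0, h1, gRef_none h0 h1]
      · simp only [fspSearch, if_neg h0, if_pos h1]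
        exact hv
  | succ fuel ih =>
    intro rem k memo hv hk
    by_cases h0 : rem = 0
    · constructor
      · simp [fspSearch, gSpec, h0, gRef_zero_rem]
      · simp only [fspSearch, h0, if_pos rfl]; exact hv
    · by_cases h1 : k ≤ 0 ∨ rem < 0
      · constructor
        · simp [fspSearch, gSpec, h0, h1, gRef_none h0 h1]
        · simp only [fspSearch, if_neg h0, if_pos h1]; exact hv
      · have hkpos : 0 < k := by omega
        have hkt : k.toNat = (k - 1).toNat + 1 := by omega
        simp only [fspSearch, if_neg h0, if_neg h1]
        cases hm : PySem.Dict.get? memo (rem, k) with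
        | some v =>
          refine ⟨?_, hv⟩
          exact hv (rem, k) v hm
        | none =>
          have hloop := fspLoop_eq_gLoop cl
            (fun rem' m => fspSearch cl fuel rem' (k - 1) m)
            (fun rem' => gSpec cl rem' (k - 1))
            (fun rem' m hm' => ih rem' (k - 1) m hm' (by omega))
            cl rem memo hv
          obtain ⟨hl1, hl2⟩ := hloop
          have hval : (fspLoop (fun rem' m => fspSearch cl fuel rem' (k - 1) m) cl rem memo).1
              = gSpec cl rem k := by
            rw [hl1]
            show gLoop (fun rem' => gSpec cl rem' (k - 1)) cl rem = gSpec cl rem k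
            unfold gSpec
            rw [hkt]
            simp only [gRef, if_neg h0, if_neg h1]
          refine ⟨hval, ?_⟩
          intro rk v hget
          by_cases hrk : rk = (rem, k)
          · subst hrk
            rw [PySem.Dict.get?_insert_self] at hget
            cases hget
            exact hval
          · rw [PySem.Dict.get?_insert_of_ne _ _ hrk] at hget
            exact hl2 rk v hget

theorem validM_empty (cl : List Int) : ValidM cl PySem.Dict.empty := by
  intro rk v h
  simp [PySem.Dict.empty, PySem.Dict.get?] at h
-- ===== VERDICT (by name: the statement is the Claim_ definition above) =====
theorem find_split_pattern_spec : Claim_equal_find_split_pattern := by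
  intro t cl mp _ _
  show find_split_pattern t cl mp = find_split_pattern_alt t cl mp
  simp only [find_split_pattern, find_split_pattern_alt]
  by_cases hnil : cl = []
  · simp [hnil]
  · simp only [if_neg hnil]
    by_cases hg : t ≤ (PySem.List.max? cl (fun y => y)).getD 0
    · simp [hg]
    · simp only [if_neg hg]
      have hA := fcA_eq_gRef t cl mp mp.toNat []
      have hB := (fspSearch_eq_gSpec cl mp.toNat t mp PySem.Dict.empty
        (validM_empty _) (by omega)).1
      rw [hA, hB]
      have hf : gRef cl mp.toNat (t - ([] : List Int).sum) (mp - ([] : List Int).length)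
          = gSpec cl t mp := by
        simp only [List.sum_nil, List.length_nil, Nat.cast_zero, sub_zero, gSpec]
      rw [hf]
      cases gSpec cl t mp with
      | none => rfl
      | some s => simp
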